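-- pv_equiv track=rewrite | github.com/HAAIL-Universe/AgentZero | challenges/C037_smt_solver/smt_solver.py | _tokenize_smt
-- ===== SOURCE A (Python) =====
-- def _tokenize_smt(text: str) -> list:
--     """Tokenize SMT-LIB2 text."""
--     tokens = []
--     i = 0
--     while i < len(text):
--         c = text[i]
--         if c in ' \t\n\r':
--             i += 1
--         elif c == ';':
--             # Comment
--             while i < len(text) and text[i] != '\n':
--                 i += 1
--         elif c == '(':
--             tokens.append('(')
--             i += 1
--         elif c == ')':
--             tokens.append(')')
--             i += 1
--         elif c == '"':
--             # String literal
--             j = i + 1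
--             while j < len(text) and text[j] != '"':
--                 j += 1
--             tokens.append(text[i:j+1])
--             i = j + 1
--         else:
--             j = i
--             while j < len(text) and text[j] not in ' \t\n\r()':
--                 j += 1
--             tokens.append(text[i:j])
--             i = j
--     return tokens
-- ===== SOURCE B (Python) =====
-- def _tokenize_smt(text: str) -> list:
--     """Tokenize SMT-LIB2 text by consuming a character stack (reversed text),
--     building each token in a buffer instead of index arithmetic and slicing."""
--     WS = ' \t\n\r'
--     stack = list(reversed(text))
--     tokens = []
--     while stack:
--         c = stack.pop()
--         if c in WS:
--             continue
--         if c == ';':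
--             # drop comment chars; the terminating newline stays on the stack
--             while stack and stack[-1] != '\n':
--                 stack.pop()
--         elif c in '()':
--             tokens.append(c)
--         elif c == '"':
--             buf = [c]
--             while stack:
--                 d = stack.pop()
--                 buf.append(d)
--                 if d == '"':
--                     break
--             tokens.append(''.join(buf))
--         else:
--             buf = [c]
--             while stack and stack[-1] not in WS and stack[-1] not in '()':
--                 buf.append(stack.pop())
--             tokens.append(''.join(buf))
--     return tokens
-- ===== Notes on version B (the rewrite author's own statement) =====
-- stated objective: alternative
-- what changed: Replaces A's index-arithmetic scanner (while over i with inner index loops and text slicing) by a stack consumer: the reversed text is popped character by character and each token is accumulated in a buffer, so no indices or slices are used.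
import Mathlib
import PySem

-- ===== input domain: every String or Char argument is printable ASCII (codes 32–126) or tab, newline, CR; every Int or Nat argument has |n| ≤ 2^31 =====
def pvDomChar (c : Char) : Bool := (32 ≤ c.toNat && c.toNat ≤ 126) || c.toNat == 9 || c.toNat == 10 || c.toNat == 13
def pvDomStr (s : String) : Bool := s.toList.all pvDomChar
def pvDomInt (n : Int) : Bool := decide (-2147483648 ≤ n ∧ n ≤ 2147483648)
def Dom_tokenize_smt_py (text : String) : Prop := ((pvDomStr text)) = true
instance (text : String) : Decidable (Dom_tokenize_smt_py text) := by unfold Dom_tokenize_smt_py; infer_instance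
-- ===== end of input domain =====

-- B replaces A's index-arithmetic scanner (inner index loops + slicing) by a stack consumer that
-- pops characters and builds each token in a buffer (objective: alternative, same O(n) cost).

-- character class ' \t\n\r' shared by both Pythons' source text
def pvIsWs (c : Char) : Bool := c == ' ' || c == '\t' || c == '\n' || c == '\r'

-- ===== PORT A =====
-- A's three inner 'while i < len(text) and <p>(text[i]): i += 1' loops, advancing an index
def pvScanWhile (cs : List Char) (p : Char → Bool) (i : Nat) : Nat :=
  if h : i < cs.length then
    if p cs[i] then pvScanWhile cs p (i + 1) else i
  else i
termination_by cs.length - i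

theorem pvScanWhile_ge (cs : List Char) (p : Char → Bool) (i : Nat) :
    i ≤ pvScanWhile cs p i := by
  rw [pvScanWhile]
  split
  · split
    · exact Nat.le_trans (Nat.le_succ i) (pvScanWhile_ge cs p (i + 1))
    · exact Nat.le_refl i
  · exact Nat.le_refl i
termination_by cs.length - i

theorem pvScanWhile_gt (cs : List Char) (p : Char → Bool) (i : Nat)
    (h : i < cs.length) (hp : p cs[i] = true) : i + 1 ≤ pvScanWhile cs p i := by
  rw [pvScanWhile]
  simp only [h, dif_pos, hp, if_pos]
  exact pvScanWhile_ge cs p (i + 1)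

-- A's main while loop over the index i (text[a:b] = PySem.List.slice on the code points)
def pvTokALoop (cs : List Char) (i : Nat) (tokens : List String) : List String :=
  if h : i < cs.length then
    let c := cs[i]
    if hw : pvIsWs c then pvTokALoop cs (i + 1) tokens
    else if hsemi : c == ';' then
      pvTokALoop cs (pvScanWhile cs (fun d => !(d == '\n')) i) tokens
    else if c == '(' then pvTokALoop cs (i + 1) (tokens ++ ["("])
    else if c == ')' then pvTokALoop cs (i + 1) (tokens ++ [")"])
    else if c == '"' then
      pvTokALoop cs (pvScanWhile cs (fun d => !(d == '"')) (i + 1) + 1)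
        (tokens ++ [String.ofList (PySem.List.slice cs (some (i : Int))
          (some ((pvScanWhile cs (fun d => !(d == '"')) (i + 1) + 1 : Nat) : Int)))])
    else
      pvTokALoop cs (pvScanWhile cs (fun d => !(pvIsWs d || d == '(' || d == ')')) i)
        (tokens ++ [String.ofList (PySem.List.slice cs (some (i : Int))
          (some ((pvScanWhile cs (fun d => !(pvIsWs d || d == '(' || d == ')')) i : Nat) : Int)))])
  else tokens
termination_by cs.length - i
decreasing_by
  · omega
  · have hc : cs[i] = ';' := by simpa using hsemi
    have := pvScanWhile_gt cs (fun d => !(d == '\n')) i h (by simp [hc])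
    omega
  · omega
  · omega
  · have := pvScanWhile_ge cs (fun d => !(d == '"')) (i + 1)
    omega
  · rename_i hl hr _
    have := pvScanWhile_gt cs (fun d => !(pvIsWs d || d == '(' || d == ')')) i h
      (by simp [show pvIsWs cs[i] = false from by simpa using hw,
                show (cs[i] == '(') = false from by simpa using hl,
                show (cs[i] == ')') = false from by simpa using hr])
    omega

def tokenize_smt_py (text : String) : List String :=
  pvTokALoop text.toList 0 []

-- ===== PORT B =====
-- Source B's string-literal inner loop: pop into buf until '"' (kept) or the stack runs out
def pvReadStr (stack : List Char) (buf : List Char) : List Char × List Char :=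
  match stack with
  | [] => (buf, [])
  | d :: rest => if d == '"' then (buf ++ [d], rest) else pvReadStr rest (buf ++ [d])

-- Source B's atom inner loop: pop into buf while the next char is not whitespace or a paren
def pvReadAtom (stack : List Char) (buf : List Char) : List Char × List Char :=
  match stack with
  | [] => (buf, [])
  | d :: rest =>
    if pvIsWs d || d == '(' || d == ')' then (buf, d :: rest) else pvReadAtom rest (buf ++ [d])

-- Source B's comment inner loop: pop until the newline, which stays on the stack
def pvDropComment : List Char → List Char
  | [] => []
  | d :: rest => if d == '\n' then d :: rest else pvDropComment rest

theorem pvDropComment_len_le (s : List Char) : (pvDropComment s).length ≤ s.length := by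
  induction s with
  | nil => simp [pvDropComment]
  | cons d rest ih =>
    rw [pvDropComment]
    split
    · simp
    · exact Nat.le_trans ih (Nat.le_succ _)

theorem pvReadStr_len_le (s buf : List Char) : (pvReadStr s buf).2.length ≤ s.length := by
  induction s generalizing buf with
  | nil => simp [pvReadStr]
  | cons d rest ih =>
    rw [pvReadStr]
    split
    · simp
    · exact Nat.le_trans (ih _) (Nat.le_succ _)

theorem pvReadAtom_len_le (s buf : List Char) : (pvReadAtom s buf).2.length ≤ s.length := by
  induction s generalizing buf with
  | nil => simp [pvReadAtom]
  | cons d rest ih =>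
    rw [pvReadAtom]
    split
    · simp
    · exact Nat.le_trans (ih _) (Nat.le_succ _)

-- Source B's main while loop; its stack holds reversed(text) and pops from the BACK, i.e. it consumes
-- the text front-to-back: modeled exactly as head-consumption of the character list.
def pvTokBLoop (stack : List Char) (tokens : List String) : List String :=
  match stack with
  | [] => tokens
  | c :: rest =>
    if pvIsWs c then pvTokBLoop rest tokens
    else if c == ';' then pvTokBLoop (pvDropComment rest) tokens
    else if c == '(' || c == ')' then pvTokBLoop rest (tokens ++ [String.ofList [c]])
    else if c == '"' then
      pvTokBLoop (pvReadStr rest [c]).2 (tokens ++ [String.ofList (pvReadStr rest [c]).1])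
    else
      pvTokBLoop (pvReadAtom rest [c]).2 (tokens ++ [String.ofList (pvReadAtom rest [c]).1])
termination_by stack.length
decreasing_by
  · simp
  · have := pvDropComment_len_le rest; simp; omega
  · simp
  · have := pvReadStr_len_le rest [c]; simp; omega
  · have := pvReadAtom_len_le rest [c]; simp; omega

def tokenize_smt_py_alt (text : String) : List String :=
  pvTokBLoop text.toList []

-- ===== PRECONDITION & SPEC =====
def Spec_tokenize_smt_py (text : String) (out : List String) : Prop := out = tokenize_smt_py_alt text
instance (text : String) (out : List String) : Decidable (Spec_tokenize_smt_py text out) := by unfold Spec_tokenize_smt_py; infer_instance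

-- ===== CLAIM (what is proved, stated in full; the proofs are below) =====
def Claim_equal_tokenize_smt_py : Prop := ∀ (text : String), Dom_tokenize_smt_py text → Spec_tokenize_smt_py text (tokenize_smt_py text)

-- ===== LEMMAS AND PROOFS =====

theorem pvScanWhile_eq (cs : List Char) (p : Char → Bool) (i : Nat) :
    pvScanWhile cs p i = i + ((cs.drop i).takeWhile p).length := by
  rw [pvScanWhile]
  split
  · rename_i h
    rw [List.drop_eq_getElem_cons h]
    split
    · rename_i hp
      rw [pvScanWhile_eq cs p (i + 1), List.takeWhile_cons_of_pos hp]
      simp; omega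
    · rename_i hp
      rw [List.takeWhile_cons_of_neg hp]
      simp
  · rename_i h
    rw [List.drop_eq_nil_of_le (by omega)]
    simp
termination_by cs.length - i

theorem pvDropComment_eq (s : List Char) :
    pvDropComment s = s.dropWhile (fun d => !(d == '\n')) := by
  induction s with
  | nil => simp [pvDropComment]
  | cons d rest ih =>
    rw [pvDropComment, List.dropWhile_cons]
    split
    · rename_i hd; simp [hd]
    · rename_i hd; simp [hd, ih]

theorem pvReadStr_eq (s buf : List Char) :
    pvReadStr s buf =
      (buf ++ s.takeWhile (fun d => !(d == '"')) ++ (s.dropWhile (fun d => !(d == '"'))).take 1,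
       (s.dropWhile (fun d => !(d == '"'))).tail) := by
  induction s generalizing buf with
  | nil => simp [pvReadStr]
  | cons d rest ih =>
    rw [pvReadStr]
    split
    · rename_i hd
      rw [List.takeWhile_cons, List.dropWhile_cons]
      simp [hd]
    · rename_i hd
      rw [ih, List.takeWhile_cons, List.dropWhile_cons]
      simp [hd]
        
theorem pvReadAtom_eq (s buf : List Char) :
    pvReadAtom s buf =
      (buf ++ s.takeWhile (fun d => !(pvIsWs d || d == '(' || d == ')')),
       s.dropWhile (fun d => !(pvIsWs d || d == '(' || d == ')'))) := by
  induction s generalizing buf with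
  | nil => simp [pvReadAtom]
  | cons d rest ih =>
    rw [pvReadAtom]
    split
    · rename_i hd
      rw [List.takeWhile_cons, List.dropWhile_cons]
      simp [hd]
    · rename_i hd
      rw [ih, List.takeWhile_cons, List.dropWhile_cons]
      simp [hd]

theorem pv_dropWhile_eq_drop (l : List Char) (p : Char → Bool) :
    l.dropWhile p = l.drop (l.takeWhile p).length := by
  induction l with
  | nil => simp
  | cons a t ih => rw [List.dropWhile_cons, List.takeWhile_cons]; split <;> simp_all

theorem pv_take_tw (l : List Char) (p : Char → Bool) (k : Nat) :
    l.take ((l.takeWhile p).length + k) = l.takeWhile p ++ (l.dropWhile p).take k := by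
  have h1 : l.take ((l.takeWhile p).length + k) =
      (l.takeWhile p ++ l.dropWhile p).take ((l.takeWhile p).length + k) := by
    rw [List.takeWhile_append_dropWhile]
  rw [h1, List.take_append, List.take_of_length_le (by omega), Nat.add_sub_cancel_left]

theorem pv_drop_tw (l : List Char) (p : Char → Bool) (k : Nat) :
    l.drop ((l.takeWhile p).length + k) = (l.dropWhile p).drop k := by
  have h1 : l.drop ((l.takeWhile p).length + k) =
      (l.takeWhile p ++ l.dropWhile p).drop ((l.takeWhile p).length + k) := by
    rw [List.takeWhile_append_dropWhile]
  rw [h1, List.drop_append, List.drop_eq_nil_of_le (by omega), Nat.add_sub_cancel_left,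
    List.nil_append]

theorem pvTok_main (cs : List Char) (i : Nat) (tokens : List String) :
    pvTokALoop cs i tokens = pvTokBLoop (cs.drop i) tokens := by
  rw [pvTokALoop]
  by_cases h : i < cs.length
  · rw [dif_pos h, List.drop_eq_getElem_cons h, pvTokBLoop]
    by_cases hw : pvIsWs cs[i] = true
    · rw [dif_pos hw, if_pos hw]
      exact pvTok_main cs (i + 1) tokens
    · rw [dif_neg hw, if_neg hw]
      by_cases hsemi : (cs[i] == ';') = true
      · rw [dif_pos hsemi, if_pos hsemi]
        have hc : cs[i] = ';' := by simpa using hsemi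
        have hgt := pvScanWhile_gt cs (fun d => !(d == '\n')) i h (by simp [hc])
        rw [pvTok_main cs (pvScanWhile cs (fun d => !(d == '\n')) i) tokens]
        congr 1
        rw [pvScanWhile_eq, ← List.drop_drop, ← pv_dropWhile_eq_drop, pvDropComment_eq,
          List.drop_eq_getElem_cons h, List.dropWhile_cons]
        simp [hc]
      · rw [dif_neg hsemi, if_neg hsemi]
        by_cases hl : (cs[i] == '(') = true
        · rw [if_pos hl, if_pos (show (cs[i] == '(' || cs[i] == ')') = true from by simp [hl])]
          rw [show String.ofList [cs[i]] = "(" from by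
            rw [show cs[i] = '(' from by simpa using hl]]
          exact pvTok_main cs (i + 1) (tokens ++ ["("])
        · rw [if_neg hl]
          by_cases hr : (cs[i] == ')') = true
          · rw [if_pos hr, if_pos (show (cs[i] == '(' || cs[i] == ')') = true from by simp [hr])]
            rw [show String.ofList [cs[i]] = ")" from by
              rw [show cs[i] = ')' from by simpa using hr]]
            exact pvTok_main cs (i + 1) (tokens ++ [")"])
          · rw [if_neg hr,
              if_neg (show ¬(cs[i] == '(' || cs[i] == ')') = true from by
                simp [show (cs[i] == '(') = false from by simpa using hl,
                  show (cs[i] == ')') = false from by simpa using hr])]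
            by_cases hq : (cs[i] == '"') = true
            · rw [if_pos hq, if_pos hq]
              have hge := pvScanWhile_ge cs (fun d => !(d == '"')) (i + 1)
              have hj := pvScanWhile_eq cs (fun d => !(d == '"')) (i + 1)
              rw [pvTok_main cs (pvScanWhile cs (fun d => !(d == '"')) (i + 1) + 1)
                (tokens ++ [String.ofList (PySem.List.slice cs (some (i : Int))
                  (some ((pvScanWhile cs (fun d => !(d == '"')) (i + 1) + 1 : Nat) : Int)))]),
                PySem.List.slice_natCast, pvReadStr_eq]
              have htok : (cs.drop i).take (pvScanWhile cs (fun d => !(d == '"')) (i + 1) + 1 - i) =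
                  cs[i] :: ((cs.drop (i + 1)).takeWhile (fun d => !(d == '"')) ++
                    ((cs.drop (i + 1)).dropWhile (fun d => !(d == '"'))).take 1) := by
                rw [List.drop_eq_getElem_cons h,
                  show pvScanWhile cs (fun d => !(d == '"')) (i + 1) + 1 - i =
                    (((cs.drop (i + 1)).takeWhile (fun d => !(d == '"'))).length + 1) + 1
                    from by omega,
                  List.take_succ_cons, pv_take_tw]
              have hstack : cs.drop (pvScanWhile cs (fun d => !(d == '"')) (i + 1) + 1) =
                  ((cs.drop (i + 1)).dropWhile (fun d => !(d == '"'))).tail := by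
                rw [show pvScanWhile cs (fun d => !(d == '"')) (i + 1) + 1 =
                    (i + 1) + (((cs.drop (i + 1)).takeWhile (fun d => !(d == '"'))).length + 1)
                    from by omega,
                  ← List.drop_drop, pv_drop_tw, List.drop_one]
              rw [htok, hstack]
              simp
            · rw [if_neg hq, if_neg hq, pvReadAtom_eq]
              have hpa : (fun d => !(pvIsWs d || d == '(' || d == ')')) cs[i] = true := by
                simp [show pvIsWs cs[i] = false from by simpa using hw,
                  show (cs[i] == '(') = false from by simpa using hl,
                  show (cs[i] == ')') = false from by simpa using hr]
              have hgt := pvScanWhile_gt cs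
                (fun d => !(pvIsWs d || d == '(' || d == ')')) i h hpa
              have hj := pvScanWhile_eq cs
                (fun d => !(pvIsWs d || d == '(' || d == ')')) i
              have hb : (pvIsWs cs[i] || cs[i] == '(' || cs[i] == ')') = false := by
                simpa using hpa
              have htw : (cs.drop i).takeWhile (fun d => !(pvIsWs d || d == '(' || d == ')')) =
                  cs[i] :: (cs.drop (i + 1)).takeWhile (fun d => !(pvIsWs d || d == '(' || d == ')')) := by
                rw [List.drop_eq_getElem_cons h, List.takeWhile_cons]
                simp [hb]
              have hdw : (cs.drop i).dropWhile (fun d => !(pvIsWs d || d == '(' || d == ')')) =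
                  (cs.drop (i + 1)).dropWhile (fun d => !(pvIsWs d || d == '(' || d == ')')) := by
                rw [List.drop_eq_getElem_cons h, List.dropWhile_cons]
                simp [hb]
              rw [pvTok_main cs (pvScanWhile cs (fun d => !(pvIsWs d || d == '(' || d == ')')) i)
                (tokens ++ [String.ofList (PySem.List.slice cs (some (i : Int))
                  (some ((pvScanWhile cs (fun d => !(pvIsWs d || d == '(' || d == ')')) i : Nat) : Int)))]),
                PySem.List.slice_natCast]
              have htok : (cs.drop i).take (pvScanWhile cs (fun d => !(pvIsWs d || d == '(' || d == ')')) i - i) =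
                  cs[i] :: (cs.drop (i + 1)).takeWhile (fun d => !(pvIsWs d || d == '(' || d == ')')) := by
                rw [show pvScanWhile cs (fun d => !(pvIsWs d || d == '(' || d == ')')) i - i =
                    ((cs.drop i).takeWhile (fun d => !(pvIsWs d || d == '(' || d == ')'))).length + 0
                    from by omega,
                  pv_take_tw, List.take_zero, List.append_nil, htw]
              have hstack : cs.drop (pvScanWhile cs (fun d => !(pvIsWs d || d == '(' || d == ')')) i) =
                  (cs.drop (i + 1)).dropWhile (fun d => !(pvIsWs d || d == '(' || d == ')')) := by
                rw [show pvScanWhile cs (fun d => !(pvIsWs d || d == '(' || d == ')')) i =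
                    i + (((cs.drop i).takeWhile (fun d => !(pvIsWs d || d == '(' || d == ')'))).length + 0)
                    from by omega,
                  ← List.drop_drop, pv_drop_tw, List.drop_zero, hdw]
              rw [htok, hstack]
              simp
  · rw [dif_neg h, List.drop_eq_nil_of_le (by omega), pvTokBLoop]
termination_by cs.length - i
decreasing_by all_goals omega

-- ===== VERDICT (by name: the statement is the Claim_ definition above) =====
theorem tokenize_smt_py_spec : Claim_equal_tokenize_smt_py := by
  intro text _
  unfold Spec_tokenize_smt_py tokenize_smt_py tokenize_smt_py_alt
  simpa using pvTok_main text.toList 0 []
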